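-- pv_equiv track=rewrite | github.com/ashenafiDL/AOC | utils/grid.py | replace_grid_items
-- ===== SOURCE A (Python) =====
-- def replace_grid_items(rows: list[str], replace_pos, replace_with: str):
--     replace_pos = set(replace_pos)
--
--     res = []
--
--     for row, line in enumerate(rows):
--         new_row = []
--         for col, char in enumerate(line):
--             if (row, col) in replace_pos:
--                 new_row.append(replace_with)
--             else:
--                 new_row.append(char)
--
--         res.append("".join(new_row))
--
--     return res
-- ===== SOURCE B (Python) =====
-- def replace_grid_items(rows: list[str], replace_pos, replace_with: str):
--     # Sort the distinct positions once (lexicographically), then merge them with the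
--     # rows in a single two-pointer pass: each affected row is rebuilt by concatenating
--     # the slices between its (ascending) replacement columns; no per-cell test is made
--     # and untouched rows are passed through unchanged.
--     pos = sorted(set(replace_pos))
--     n = len(pos)
--     i = 0
--     res = []
--     for r, line in enumerate(rows):
--         while i < n and pos[i][0] < r:
--             i += 1
--         parts = []
--         prev = 0
--         changed = False
--         while i < n and pos[i][0] == r:
--             c = pos[i][1]
--             i += 1
--             if 0 <= c < len(line):
--                 parts.append(line[prev:c])
--                 parts.append(replace_with)
--                 prev = c + 1
--                 changed = True
--         res.append("".join(parts) + line[prev:] if changed else line)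
--     return res
-- ===== Notes on version B (the rewrite author's own statement) =====
-- stated objective: faster
-- what changed: B sorts the distinct positions lexicographically once and then merges them with the rows in a single two-pointer pass, rebuilding each affected row by concatenating the string slices between its ascending replacement columns, instead of testing every grid cell for membership in the position set.
import Mathlib
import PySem

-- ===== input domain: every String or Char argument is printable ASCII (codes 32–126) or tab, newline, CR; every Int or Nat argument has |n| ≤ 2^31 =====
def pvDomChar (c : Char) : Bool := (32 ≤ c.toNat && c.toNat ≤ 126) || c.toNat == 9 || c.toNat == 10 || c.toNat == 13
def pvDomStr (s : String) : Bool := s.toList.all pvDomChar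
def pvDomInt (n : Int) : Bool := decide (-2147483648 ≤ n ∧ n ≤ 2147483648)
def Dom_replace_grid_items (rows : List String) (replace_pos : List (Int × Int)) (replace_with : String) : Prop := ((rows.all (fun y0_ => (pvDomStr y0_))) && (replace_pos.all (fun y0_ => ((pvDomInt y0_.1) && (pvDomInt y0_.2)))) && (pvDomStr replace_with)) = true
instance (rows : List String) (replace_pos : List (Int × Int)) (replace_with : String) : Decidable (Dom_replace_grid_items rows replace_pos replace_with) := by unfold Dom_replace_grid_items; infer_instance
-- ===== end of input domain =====

-- B sorts the distinct positions once and rebuilds each affected row in a single merge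
-- pass by concatenating the slices between its ascending replacement columns instead of
-- testing every cell against the position set (measured faster on the generated inputs).

-- ===== PORT A =====
def replace_grid_items (rows : List String) (replace_pos : List (Int × Int)) (replace_with : String) : List String :=
  let rp : PySem.Set (Int × Int) := PySem.Set.ofList replace_pos
  (PySem.List.enumerate rows).foldl (fun res rl =>
    let new_row : List Char :=
      (PySem.List.enumerate rl.2.toList).foldl (fun nr cc =>
        if (rl.1, cc.1) ∈ rp then nr ++ replace_with.toList else nr ++ [cc.2]) []
    res ++ [String.ofList new_row]) []

-- ===== PORT B =====
-- inner while loop: consume the run of positions for row r, accumulating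
-- (parts, prev, changed); returns them with the unconsumed rest of the list
def bInner (r : Int) (line : List Char) (rw : List Char) :
    List (Int × Int) → List Char → Int → Bool → List Char × Int × Bool × List (Int × Int)
  | [], parts, prev, changed => (parts, prev, changed, [])
  | p :: rest, parts, prev, changed =>
    if p.1 = r then
      if 0 ≤ p.2 ∧ p.2 < (line.length : Int) then
        bInner r line rw rest (parts ++ PySem.List.slice line (some prev) (some p.2) ++ rw) (p.2 + 1) true
      else
        bInner r line rw rest parts prev changed
    else (parts, prev, changed, p :: rest)

-- outer for loop over the rows, carrying the row index and the rest of the sorted positions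
def bGo (rw : List Char) : Int → List String → List (Int × Int) → List String
  | _, [], _ => []
  | r, line :: rest, pos =>
    let pos1 := pos.dropWhile (fun p => decide (p.1 < r))
    let out := bInner r line.toList rw pos1 [] 0 false
    (if out.2.2.1 then String.ofList (out.1 ++ PySem.List.slice line.toList (some out.2.1) none) else line)
      :: bGo rw (r + 1) rest out.2.2.2

def replace_grid_items_alt (rows : List String) (replace_pos : List (Int × Int)) (replace_with : String) : List String :=
  let pos := PySem.List.sorted2 (PySem.Set.ofList replace_pos) (fun p => p.1) (fun p => p.2)
  bGo replace_with.toList 0 rows pos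

-- ===== PRECONDITION & SPEC =====
def Spec_replace_grid_items (rows : List String) (replace_pos : List (Int × Int)) (replace_with : String) (out : List String) : Prop := out = replace_grid_items_alt rows replace_pos replace_with
instance (rows : List String) (replace_pos : List (Int × Int)) (replace_with : String) (out : List String) : Decidable (Spec_replace_grid_items rows replace_pos replace_with out) := by unfold Spec_replace_grid_items; infer_instance

-- ===== CLAIM (what is proved, stated in full; the proofs are below) =====
def Claim_equal_replace_grid_items : Prop := ∀ (rows : List String) (replace_pos : List (Int × Int)) (replace_with : String), Dom_replace_grid_items rows replace_pos replace_with → Spec_replace_grid_items rows replace_pos replace_with (replace_grid_items rows replace_pos replace_with)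

-- ===== LEMMAS AND PROOFS =====

-- Python's lexicographic tuple order on pairs of ints
def lexLt (a b : Int × Int) : Prop := a.1 < b.1 ∨ (a.1 = b.1 ∧ a.2 < b.2)

-- the comparison function sorted2 uses, and its meaning
def bfr (a b : Int × Int) : Bool := decide (a.1 < b.1) || (!decide (b.1 < a.1) && decide (a.2 < b.2))

theorem bfr_iff (a b : Int × Int) : bfr a b = true ↔ lexLt a b := by
  unfold bfr lexLt
  simp only [Bool.or_eq_true, Bool.and_eq_true, Bool.not_eq_true', decide_eq_true_eq,
    decide_eq_false_iff_not]
  constructor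
  · rintro (h | ⟨h1, h2⟩)
    · exact Or.inl h
    · rcases lt_or_ge a.1 b.1 with h' | h'
      · exact Or.inl h'
      · exact Or.inr ⟨le_antisymm (le_of_not_gt h1) h', h2⟩
  · rintro (h | ⟨h1, h2⟩)
    · exact Or.inl h
    · exact Or.inr ⟨by omega, h2⟩

-- nLe a b : "a does not come strictly after b" — the order insertBy keeps
def nLe (a b : Int × Int) : Prop := bfr b a = false

theorem nLe_iff (a b : Int × Int) : nLe a b ↔ ¬ lexLt b a := by
  unfold nLe
  rw [← bfr_iff]
  simp

theorem nLe_trans {a b c : Int × Int} (h1 : nLe a b) (h2 : nLe b c) : nLe a c := by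
  rw [nLe_iff] at *
  unfold lexLt at *
  omega

theorem pairwise_insertBy (x : Int × Int) (acc : List (Int × Int))
    (h : acc.Pairwise nLe) : (PySem.List.insertBy bfr x acc).Pairwise nLe := by
  induction acc with
  | nil => simp [PySem.List.insertBy]
  | cons y ys ih =>
    rcases List.pairwise_cons.mp h with ⟨hy, hys⟩
    by_cases hb : bfr x y = true
    · rw [show PySem.List.insertBy bfr x (y :: ys) = x :: y :: ys by
        simp [PySem.List.insertBy, hb]]
      refine List.pairwise_cons.mpr ⟨?_, h⟩
      intro z hz
      rcases List.mem_cons.mp hz with rfl | hz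
      · rw [nLe_iff, ← bfr_iff] at *
        intro hc
        rw [bfr_iff] at hb hc
        unfold lexLt at hb hc
        omega
      · have hxy : nLe x y := by
          rw [nLe_iff, ← bfr_iff]
          intro hc
          rw [bfr_iff] at hb hc
          unfold lexLt at hb hc
          omega
        exact nLe_trans hxy (hy z hz)
    · rw [show PySem.List.insertBy bfr x (y :: ys) = y :: PySem.List.insertBy bfr x ys by
        simp [PySem.List.insertBy, hb]]
      refine List.pairwise_cons.mpr ⟨?_, ih hys⟩
      intro z hz
      rcases (PySem.List.mem_insertBy bfr x z ys).mp hz with rfl | hz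
      · exact Bool.eq_false_iff.mpr hb
      · exact hy z hz

theorem pairwise_foldl_insertBy (xs acc : List (Int × Int)) (h : acc.Pairwise nLe) :
    (xs.foldl (fun a x => PySem.List.insertBy bfr x a) acc).Pairwise nLe := by
  induction xs generalizing acc with
  | nil => exact h
  | cons x t ih => exact ih _ (pairwise_insertBy x acc h)

theorem sorted2_eq_foldl (xs : List (Int × Int)) :
    PySem.List.sorted2 xs (fun p => p.1) (fun p => p.2) =
      xs.foldl (fun a x => PySem.List.insertBy bfr x a) [] := rfl

theorem sp_pairwise_lexLt (ps : List (Int × Int)) :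
    (PySem.List.sorted2 (PySem.Set.ofList ps) (fun p => p.1) (fun p => p.2)).Pairwise lexLt := by
  have hperm := PySem.List.sorted2_perm (PySem.Set.ofList ps) (fun p => p.1) (fun p => p.2) false
  have hnd : (PySem.List.sorted2 (PySem.Set.ofList ps) (fun p => p.1) (fun p => p.2)).Nodup :=
    hperm.nodup_iff.mpr (PySem.Set.nodup_ofList ps)
  have hle : (PySem.List.sorted2 (PySem.Set.ofList ps) (fun p => p.1) (fun p => p.2)).Pairwise nLe := by
    rw [sorted2_eq_foldl]
    exact pairwise_foldl_insertBy _ [] (List.Pairwise.nil)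
  have := hle.and hnd
  refine this.imp ?_
  rintro a b ⟨h1, h2⟩
  rw [nLe_iff] at h1
  unfold lexLt at *
  have : ¬ (a.1 = b.1 ∧ a.2 = b.2) := by
    intro hc
    exact h2 (Prod.ext hc.1 hc.2)
  omega

theorem sp_mem (ps : List (Int × Int)) (p : Int × Int) :
    p ∈ PySem.List.sorted2 (PySem.Set.ofList ps) (fun p => p.1) (fun p => p.2) ↔ p ∈ ps := by
  rw [(PySem.List.sorted2_perm (PySem.Set.ofList ps) (fun p => p.1) (fun p => p.2) false).mem_iff]
  exact PySem.Set.mem_ofList ps p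

-- generic dropWhile facts
theorem mem_dropWhile_of_mem {α : Type} (pred : α → Bool) (l : List α) (p : α)
    (hm : p ∈ l) (hp : pred p = false) : p ∈ l.dropWhile pred := by
  induction l with
  | nil => cases hm
  | cons q t ih =>
    by_cases hq : pred q = true
    · rw [List.dropWhile_cons_of_pos hq]
      rcases List.mem_cons.mp hm with rfl | hm
      · rw [hq] at hp; cases hp
      · exact ih hm
    · rw [List.dropWhile_cons_of_neg hq]
      exact hm

theorem rows_ge_dropWhile (r : Int) (pos : List (Int × Int)) (h : pos.Pairwise lexLt) :
    ∀ p ∈ pos.dropWhile (fun q => decide (q.1 < r)), r ≤ p.1 := by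
  induction pos with
  | nil => intro p hp; cases hp
  | cons q t ih =>
    rcases List.pairwise_cons.mp h with ⟨hq, ht⟩
    intro p hp
    by_cases hlt : q.1 < r
    · rw [List.dropWhile_cons_of_pos (by simpa using hlt)] at hp
      exact ih ht p hp
    · rw [List.dropWhile_cons_of_neg (by simpa using hlt)] at hp
      rcases List.mem_cons.mp hp with rfl | hp
      · omega
      · have := hq p hp
        unfold lexLt at this
        omega

theorem rows_ne_dropWhile_run (r : Int) (pos : List (Int × Int)) (h : pos.Pairwise lexLt)
    (hge : ∀ p ∈ pos, r ≤ p.1) :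
    ∀ p ∈ pos.dropWhile (fun q => q.1 == r), p.1 ≠ r := by
  induction pos with
  | nil => intro p hp; cases hp
  | cons q t ih =>
    rcases List.pairwise_cons.mp h with ⟨hq, ht⟩
    intro p hp
    by_cases he : q.1 = r
    · rw [List.dropWhile_cons_of_pos (by simpa using he)] at hp
      exact ih ht (fun p hp => hge p (List.mem_cons_of_mem _ hp)) p hp
    · rw [List.dropWhile_cons_of_neg (by simpa using he)] at hp
      have hqr : r ≤ q.1 := hge q (List.mem_cons_self ..)
      rcases List.mem_cons.mp hp with rfl | hp
      · exact he
      · have := hq p hp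
        unfold lexLt at this
        omega

-- A's per-cell row transformation
def gRep (ps : List (Int × Int)) (rwL : List Char) (r : Int) (cc : Int × Char) : List Char :=
  if (r, cc.1) ∈ ps then rwL else [cc.2]

-- the not-yet-emitted part of A's transformed row, from column prev on
def tailO (ps : List (Int × Int)) (rwL : List Char) (r : Int) (L : List Char) (prev : Int) : List Char :=
  (PySem.List.enumerate (L.drop prev.toNat) prev).flatMap (gRep ps rwL r)

theorem flatMap_congr_mem {α β : Type} {f g : α → List β} (l : List α)
    (h : ∀ x ∈ l, f x = g x) : l.flatMap f = l.flatMap g := by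
  induction l with
  | nil => rfl
  | cons x t ih =>
    simp only [List.flatMap_cons]
    rw [h x (List.mem_cons_self ..), ih (fun x hx => h x (List.mem_cons_of_mem _ hx))]

theorem tailO_id (ps : List (Int × Int)) (rwL : List Char) (r : Int) (L : List Char) (prev : Int)
    (h0 : 0 ≤ prev)
    (hno : ∀ i : Int, prev ≤ i → i < L.length → (r, i) ∉ ps) :
    tailO ps rwL r L prev = L.drop prev.toNat := by
  unfold tailO
  have : ((PySem.List.enumerate (L.drop prev.toNat) prev).flatMap (gRep ps rwL r)) =
      ((PySem.List.enumerate (L.drop prev.toNat) prev).flatMap (fun cc => [cc.2])) := by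
    apply flatMap_congr_mem
    intro cc hcc
    rcases (PySem.List.mem_enumerate_iff _ _ _).mp hcc with ⟨k, hk, rfl⟩
    unfold gRep
    rw [if_neg]
    rw [List.length_drop] at hk
    apply hno
    · omega
    · omega
  rw [this]
  have : ∀ (l : List (Int × Char)), l.flatMap (fun cc => [cc.2]) = l.map (·.2) := by
    intro l; induction l with
    | nil => rfl
    | cons x t ih => simp [ih]
  rw [this, PySem.List.map_snd_enumerate]

theorem tailO_split (ps : List (Int × Int)) (rwL : List Char) (r : Int) (L : List Char)
    (prev c : Int) (h0 : 0 ≤ prev) (hpc : prev ≤ c) (hc : c < L.length)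
    (hin : (r, c) ∈ ps)
    (hgap : ∀ i : Int, prev ≤ i → i < c → (r, i) ∉ ps) :
    tailO ps rwL r L prev =
      PySem.List.slice L (some prev) (some c) ++ rwL ++ tailO ps rwL r L (c + 1) := by
  unfold tailO
  have hcn : c.toNat < L.length := by omega
  have hsplit : L.drop prev.toNat =
      (L.drop prev.toNat).take (c.toNat - prev.toNat) ++ L.drop c.toNat := by
    have h1 := List.take_append_drop (c.toNat - prev.toNat) (L.drop prev.toNat)
    rw [List.drop_drop, show prev.toNat + (c.toNat - prev.toNat) = c.toNat from by omega] at h1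
    exact h1.symm
  rw [hsplit, PySem.List.enumerate_append, List.flatMap_append]
  have hlen : ((L.drop prev.toNat).take (c.toNat - prev.toNat)).length = c.toNat - prev.toNat := by
    rw [List.length_take, List.length_drop]
    omega
  have hfirst : ((PySem.List.enumerate ((L.drop prev.toNat).take (c.toNat - prev.toNat)) prev).flatMap
      (gRep ps rwL r)) = (L.drop prev.toNat).take (c.toNat - prev.toNat) := by
    have : ((PySem.List.enumerate ((L.drop prev.toNat).take (c.toNat - prev.toNat)) prev).flatMap
        (gRep ps rwL r)) = ((PySem.List.enumerate ((L.drop prev.toNat).take (c.toNat - prev.toNat)) prev).flatMap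
        (fun cc => [cc.2])) := by
      apply flatMap_congr_mem
      intro cc hcc
      rcases (PySem.List.mem_enumerate_iff _ _ _).mp hcc with ⟨k, hk, rfl⟩
      rw [hlen] at hk
      unfold gRep
      rw [if_neg]
      apply hgap
      · omega
      · omega
    rw [this]
    have : ∀ (l : List (Int × Char)), l.flatMap (fun cc => [cc.2]) = l.map (·.2) := by
      intro l; induction l with
      | nil => rfl
      | cons x t ih => simp [ih]
    rw [this, PySem.List.map_snd_enumerate]
  have hdropc : L.drop c.toNat = L[c.toNat] :: L.drop (c.toNat + 1) :=
    List.drop_eq_getElem_cons hcn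
  rw [hfirst, hdropc, PySem.List.enumerate_cons, List.flatMap_cons]
  have hstart : prev + (((L.drop prev.toNat).take (c.toNat - prev.toNat)).length : Int) = c := by
    rw [hlen]; omega
  rw [hstart]
  have hhead : gRep ps rwL r (c, L[c.toNat]) = rwL := by
    unfold gRep
    rw [if_pos hin]
  rw [hhead]
  have hslice : PySem.List.slice L (some prev) (some c) =
      (L.drop prev.toNat).take (c.toNat - prev.toNat) :=
    PySem.List.slice_toNat L h0 (by omega)
  rw [hslice]
  have hc1 : (c + 1).toNat = c.toNat + 1 := by omega
  rw [hc1]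
  simp [List.append_assoc]

-- specification of the inner while loop
theorem inner_spec (ps : List (Int × Int)) (rwL : List Char) (r : Int) (L : List Char) :
    ∀ (pos : List (Int × Int)) (parts : List Char) (prev : Int) (changed : Bool),
    pos.Pairwise lexLt →
    (∀ p ∈ pos, r ≤ p.1) →
    0 ≤ prev → prev ≤ L.length →
    (∀ c : Int, prev ≤ c → c < L.length → ((r, c) ∈ pos ↔ (r, c) ∈ ps)) →
    (∀ c : Int, (r, c) ∈ pos → 0 ≤ c → c < L.length → prev ≤ c) →
    (let out := bInner r L rwL pos parts prev changed
     out.2.2.2 = pos.dropWhile (fun p => p.1 == r) ∧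
     out.1 ++ tailO ps rwL r L out.2.1 = parts ++ tailO ps rwL r L prev ∧
     0 ≤ out.2.1 ∧ out.2.1 ≤ L.length ∧
     (∀ c : Int, out.2.1 ≤ c → c < L.length → ((r, c) ∈ out.2.2.2 ↔ (r, c) ∈ ps)) ∧
     (out.2.2.1 = false → out.1 = parts ∧ out.2.1 = prev ∧ changed = false)) := by
  intro pos
  induction pos with
  | nil =>
    intro parts prev changed _ _ h0 hlen h3 _
    refine ⟨rfl, rfl, h0, hlen, ?_, ?_⟩
    · intro c hc1 hc2
      exact h3 c hc1 hc2
    · intro h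
      exact ⟨rfl, rfl, h⟩
  | cons p rest ih =>
    intro parts prev changed hpw hge h0 hlen h3 h4
    rcases List.pairwise_cons.mp hpw with ⟨hp, hrest⟩
    by_cases he : p.1 = r
    · have hdw : (p :: rest).dropWhile (fun q => q.1 == r) = rest.dropWhile (fun q => q.1 == r) :=
        List.dropWhile_cons_of_pos (by simpa using he)
      by_cases hrange : 0 ≤ p.2 ∧ p.2 < (L.length : Int)
      · have hstep : bInner r L rwL (p :: rest) parts prev changed =
            bInner r L rwL rest (parts ++ PySem.List.slice L (some prev) (some p.2) ++ rwL) (p.2 + 1) true := by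
          simp only [bInner, if_pos he, if_pos hrange]
        have hprevc : prev ≤ p.2 := by
          apply h4 p.2
          · rw [← he]; exact List.mem_cons_self ..
          · exact hrange.1
          · exact hrange.2
        have hmemps : (r, p.2) ∈ ps := by
          rw [← h3 p.2 hprevc hrange.2]
          have : (r, p.2) = p := by
            apply Prod.ext
            · exact he.symm
            · rfl
          rw [this]
          exact List.mem_cons_self ..
        have hgap : ∀ i : Int, prev ≤ i → i < p.2 → (r, i) ∉ ps := by
          intro i hi1 hi2 hc
          have hmm : (r, i) ∈ p :: rest := (h3 i hi1 (by omega)).mpr hc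
          rcases List.mem_cons.mp hmm with heq | hm
          · have := congrArg Prod.snd heq
            simp at this
            omega
          · have := hp (r, i) hm
            unfold lexLt at this
            omega
        have ihres := ih (parts ++ PySem.List.slice L (some prev) (some p.2) ++ rwL) (p.2 + 1) true
          hrest (fun q hq => hge q (List.mem_cons_of_mem _ hq)) (by omega) (by omega)
          (by
            intro c hc1 hc2
            constructor
            · intro hm
              exact (h3 c (by omega) hc2).mp (List.mem_cons_of_mem _ hm)
            · intro hm
              rcases List.mem_cons.mp ((h3 c (by omega) hc2).mpr hm) with h' | h'
              · exfalso
                have := congrArg Prod.snd h'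
                simp at this
                omega
              · exact h')
          (by
            intro c hm _ _
            have := hp (r, c) hm
            unfold lexLt at this
            omega)
        rw [hstep]
        refine ⟨by rw [ihres.1, hdw], ?_, ihres.2.2.1, ihres.2.2.2.1,
          ihres.2.2.2.2.1, ?_⟩
        · rw [ihres.2.1]
          rw [tailO_split ps rwL r L prev p.2 h0 hprevc hrange.2 hmemps hgap]
          simp [List.append_assoc]
        · intro hf
          rcases ihres.2.2.2.2.2 hf with ⟨_, _, hcc⟩
          cases hcc
      · have hstep : bInner r L rwL (p :: rest) parts prev changed =
            bInner r L rwL rest parts prev changed := by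
          simp only [bInner, if_pos he, if_neg hrange]
        have ihres := ih parts prev changed hrest
          (fun q hq => hge q (List.mem_cons_of_mem _ hq)) h0 hlen
          (by
            intro c hc1 hc2
            constructor
            · intro hm
              exact (h3 c hc1 hc2).mp (List.mem_cons_of_mem _ hm)
            · intro hm
              rcases List.mem_cons.mp ((h3 c hc1 hc2).mpr hm) with h' | h'
              · exfalso
                have h2' := congrArg Prod.snd h'
                simp at h2'
                apply hrange
                constructor
                · omega
                · omega
              · exact h')
          (fun c hm hc1 hc2 => h4 c (List.mem_cons_of_mem _ hm) hc1 hc2)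
        rw [hstep]
        exact ⟨by rw [ihres.1, hdw], ihres.2.1, ihres.2.2.1, ihres.2.2.2.1,
          ihres.2.2.2.2.1, ihres.2.2.2.2.2⟩
    · have hstep : bInner r L rwL (p :: rest) parts prev changed = (parts, prev, changed, p :: rest) := by
        simp only [bInner, if_neg he]
      rw [hstep]
      refine ⟨(List.dropWhile_cons_of_neg (by simpa using he)).symm, rfl, h0, hlen, h3, ?_⟩
      intro h
      exact ⟨rfl, rfl, h⟩

-- specification of the outer loop
theorem go_spec (ps : List (Int × Int)) (rwL : List Char) :
    ∀ (rows : List String) (r : Int) (pos : List (Int × Int)),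
    pos.Pairwise lexLt →
    (∀ p : Int × Int, r ≤ p.1 → (p ∈ pos ↔ p ∈ ps)) →
    bGo rwL r rows pos = (PySem.List.enumerate rows r).map
      (fun rl => String.ofList ((PySem.List.enumerate rl.2.toList).flatMap (gRep ps rwL rl.1))) := by
  intro rows
  induction rows with
  | nil => intro r pos _ _; simp [bGo]
  | cons line rest ih =>
    intro r pos hpw hmem
    rw [PySem.List.enumerate_cons, List.map_cons]
    set pos1 := pos.dropWhile (fun p => decide (p.1 < r)) with hpos1
    have hpw1 : pos1.Pairwise lexLt := List.Pairwise.sublist (List.dropWhile_sublist _) hpw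
    have hge1 : ∀ p ∈ pos1, r ≤ p.1 := rows_ge_dropWhile r pos hpw
    have h3 : ∀ c : Int, (0 : Int) ≤ c → c < line.toList.length → ((r, c) ∈ pos1 ↔ (r, c) ∈ ps) := by
      intro c _ _
      constructor
      · intro hm
        exact (hmem (r, c) (le_refl r)).mp ((List.dropWhile_sublist _).subset hm)
      · intro hm
        apply mem_dropWhile_of_mem
        · exact (hmem (r, c) (le_refl r)).mpr hm
        · simp
    have hinner := inner_spec ps rwL r line.toList pos1 [] 0 false hpw1 hge1 (le_refl 0)
      (by omega) h3 (fun c _ hc1 _ => hc1)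
    set out := bInner r line.toList rwL pos1 [] 0 false with hout
    simp only at hinner
    rcases hinner with ⟨hrest, hparts, hp0, hplen, hmemend, hunch⟩
    have hnorow : ∀ p ∈ out.2.2.2, p.1 ≠ r := by
      rw [hrest]
      exact rows_ne_dropWhile_run r pos1 hpw1 hge1
    have hnops : ∀ i : Int, out.2.1 ≤ i → i < line.toList.length → (r, i) ∉ ps := by
      intro i hi1 hi2 hc
      exact hnorow (r, i) ((hmemend i hi1 hi2).mpr hc) rfl
    have htail : tailO ps rwL r line.toList out.2.1 = line.toList.drop out.2.1.toNat :=
      tailO_id ps rwL r line.toList out.2.1 hp0 hnops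
    have hhead : (if out.2.2.1 then
        String.ofList (out.1 ++ PySem.List.slice line.toList (some out.2.1) none) else line) =
        String.ofList ((PySem.List.enumerate line.toList).flatMap (gRep ps rwL r)) := by
      have hT : ((PySem.List.enumerate line.toList).flatMap (gRep ps rwL r)) =
          tailO ps rwL r line.toList 0 := by
        unfold tailO
        norm_num
      by_cases hch : out.2.2.1 = true
      · rw [if_pos hch, hT]
        have h' : tailO ps rwL r line.toList 0 = out.1 ++ tailO ps rwL r line.toList out.2.1 := by
          rw [hparts]; simp
        rw [h', htail, PySem.List.slice_from line.toList hp0]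
      · rw [if_neg hch]
        rcases hunch (Bool.eq_false_iff.mpr hch) with ⟨hpe, hpr, _⟩
        rw [hpr] at htail
        have hz : tailO ps rwL r line.toList 0 = line.toList := by
          rw [htail]; simp
        rw [hT, hz]
        simp
    rw [bGo, ← hpos1, ← hout, hhead]
    congr 1
    apply ih (r + 1) out.2.2.2 (by rw [hrest]; exact List.Pairwise.sublist (List.dropWhile_sublist _) hpw1)
    intro p hp
    constructor
    · intro hm
      apply (hmem p (by omega)).mp
      apply (List.dropWhile_sublist _).subset
      rw [hrest] at hm
      exact ((List.dropWhile_sublist _).subset hm : p ∈ pos1)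
    · intro hm
      rw [hrest]
      apply mem_dropWhile_of_mem
      · apply mem_dropWhile_of_mem
        · exact (hmem p (by omega)).mpr hm
        · simp; omega
      · simp; omega

-- A's output in row-map form
theorem a_eq_map (rows : List String) (ps : List (Int × Int)) (rw : String) :
    replace_grid_items rows ps rw = (PySem.List.enumerate rows).map
      (fun rl => String.ofList ((PySem.List.enumerate rl.2.toList).flatMap (gRep ps rw.toList rl.1))) := by
  unfold replace_grid_items
  simp only []
  have hrow : ∀ (rl : Int × String),
      ((PySem.List.enumerate rl.2.toList).foldl (fun nr cc =>
        if (rl.1, cc.1) ∈ PySem.Set.ofList ps then nr ++ rw.toList else nr ++ [cc.2]) []) =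
      ((PySem.List.enumerate rl.2.toList).flatMap (gRep ps rw.toList rl.1)) := by
    intro rl
    have hcg : ((PySem.List.enumerate rl.2.toList).foldl (fun nr cc =>
        if (rl.1, cc.1) ∈ PySem.Set.ofList ps then nr ++ rw.toList else nr ++ [cc.2]) []) =
        ((PySem.List.enumerate rl.2.toList).foldl (fun nr cc => nr ++ gRep ps rw.toList rl.1 cc) []) := by
      apply PySem.List.foldl_congr_mem
      intro acc cc _
      unfold gRep
      by_cases hm : (rl.1, cc.1) ∈ ps
      · rw [if_pos ((PySem.Set.mem_ofList _ _).mpr hm), if_pos hm]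
      · rw [if_neg (fun hc => hm ((PySem.Set.mem_ofList _ _).mp hc)), if_neg hm]
    rw [hcg, PySem.List.foldl_append_eq_flatMap]
    simp
  calc ((PySem.List.enumerate rows).foldl (fun res rl =>
        res ++ [String.ofList ((PySem.List.enumerate rl.2.toList).foldl (fun nr cc =>
          if (rl.1, cc.1) ∈ PySem.Set.ofList ps then nr ++ rw.toList else nr ++ [cc.2]) [])]) [])
      = ((PySem.List.enumerate rows).foldl (fun res rl =>
          res ++ [String.ofList ((PySem.List.enumerate rl.2.toList).flatMap (gRep ps rw.toList rl.1))]) []) := by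
        apply PySem.List.foldl_congr_mem
        intro acc rl _
        rw [hrow rl]
    _ = _ := by
        rw [PySem.List.foldl_append_singleton_eq_map]
        simp

-- ===== VERDICT (by name: the statement is the Claim_ definition above) =====
theorem replace_grid_items_spec : Claim_equal_replace_grid_items := by
  intro rows ps rw _
  unfold Spec_replace_grid_items replace_grid_items_alt
  simp only []
  rw [a_eq_map, go_spec ps rw.toList rows 0
    (PySem.List.sorted2 (PySem.Set.ofList ps) (fun p => p.1) (fun p => p.2))
    (sp_pairwise_lexLt ps) (fun p _ => sp_mem ps p)]
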